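-- pv_equiv track=rewrite | github.com/mjstarke/globe-QA | flags.py | count_flags
-- ===== SOURCE A (Python) =====
-- from typing import List, Optional, Union, Tuple, Dict
--
-- def count_flags(obs: List[dict]) -> Dict[str, int]:
--     """
--     Finds and counts flags in the observations.
--     :param obs: The observations.
--     :return: A dictionary of (flag, count) pairs.
--     """
--     flag_counts = dict()
--
--     for ob in obs:
--         flags = ob["flags"].split()
--         for flag in flags:
--             try:
--                 flag_counts[flag] += 1
--             except KeyError:
--                 flag_counts[flag] = 1
--
--     return flag_counts
-- ===== SOURCE B (Python) =====
-- def count_flags(obs):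
--     """
--     Finds and counts flags in the observations.
--     :param obs: The observations.
--     :return: A dictionary of (flag, count) pairs.
--     """
--     words = [flag for ob in obs for flag in ob["flags"].split()]
--     return {flag: words.count(flag) for flag in dict.fromkeys(words)}
-- ===== Notes on version B (the rewrite author's own statement) =====
-- stated objective: alternative
-- what changed: B flattens every observation's flags into one word list and builds the result in a dict comprehension over the first-occurrence-deduplicated words using list.count, instead of A's incremental try/except counter dict.
import Mathlib
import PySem

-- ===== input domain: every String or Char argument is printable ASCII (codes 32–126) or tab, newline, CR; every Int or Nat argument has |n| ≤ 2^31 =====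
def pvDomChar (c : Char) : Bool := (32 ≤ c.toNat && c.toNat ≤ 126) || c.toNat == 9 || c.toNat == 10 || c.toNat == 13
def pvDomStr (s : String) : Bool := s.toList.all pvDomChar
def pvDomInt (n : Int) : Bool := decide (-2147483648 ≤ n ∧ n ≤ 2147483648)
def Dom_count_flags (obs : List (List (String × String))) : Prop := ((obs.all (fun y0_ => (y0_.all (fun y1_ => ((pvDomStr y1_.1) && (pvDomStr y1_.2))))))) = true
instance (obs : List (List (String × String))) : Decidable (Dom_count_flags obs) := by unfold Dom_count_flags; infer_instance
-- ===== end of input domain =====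

-- B replaces A's incremental try/except counter dict with a flatten-then-count-per-distinct-word
-- dict comprehension (alternative decomposition, same return value).

-- shared transliteration of `ob["flags"].split()` (the `.getD ""` only totalises the lookup;
-- Pre_ excludes the `none` case, where Python raises KeyError)
def pvFlagsOf (ob : List (String × String)) : List String :=
  PySem.Str.split₀ (((PySem.Dict.mk ob).get? "flags").getD "")

-- ===== PORT A =====
def count_flags (obs : List (List (String × String))) : List (String × Int) :=
  (obs.foldl (fun flag_counts ob =>
      (pvFlagsOf ob).foldl (fun d flag =>
          -- try: d[flag] += 1  except KeyError: d[flag] = 1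
          match d.get? flag with
          | some v => d.insert flag (v + 1)
          | none   => d.insert flag 1) flag_counts)
    PySem.Dict.empty).items

-- ===== PORT B =====
def count_flags_alt (obs : List (List (String × String))) : List (String × Int) :=
  let words := obs.flatMap (fun ob => pvFlagsOf ob)
  (PySem.List.dedup words).map (fun flag => (flag, (PySem.List.count words flag : Int)))

-- ===== PRECONDITION & SPEC =====
-- Pre_ excludes exactly the inputs where some observation has no "flags" key: there Python A
-- (and Python B alike) raises KeyError.
def Pre_count_flags (obs : List (List (String × String))) : Prop :=
  ∀ ob ∈ obs, "flags" ∈ ob.map Prod.fst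
instance (obs : List (List (String × String))) : Decidable (Pre_count_flags obs) := by
  unfold Pre_count_flags; infer_instance

def pvWitness_count_flags : (List (List (String × String))) :=
  [[("flags", "a b a")], [("flags", "b")]]

def Spec_count_flags (obs : List (List (String × String))) (out : List (String × Int)) : Prop := out = count_flags_alt obs
instance (obs : List (List (String × String))) (out : List (String × Int)) : Decidable (Spec_count_flags obs out) := by unfold Spec_count_flags; infer_instance

-- ===== CLAIM (what is proved, stated in full; the proofs are below) =====
def Claim_equal_count_flags : Prop := ∀ (obs : List (List (String × String))), Dom_count_flags obs → Pre_count_flags obs → Spec_count_flags obs (count_flags obs)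

-- ===== LEMMAS AND PROOFS =====

-- A's try/except increment step is the getD-increment step of a counter loop.
theorem count_flags_step_eq (d : PySem.Dict String Int) (flag : String) :
    (match d.get? flag with
     | some v => d.insert flag (v + 1)
     | none   => d.insert flag 1) = d.insert flag (d.getD flag 0 + 1) := by
  unfold PySem.Dict.getD
  cases d.get? flag <;> rfl

theorem count_flags_eq_counter_items (obs : List (List (String × String))) :
    count_flags obs = (PySem.Dict.counter (obs.flatMap (fun ob => pvFlagsOf ob))).items := by
  unfold count_flags
  rw [show (fun (flag_counts : PySem.Dict String Int) ob =>
        (pvFlagsOf ob).foldl (fun d flag =>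
          match d.get? flag with
          | some v => d.insert flag (v + 1)
          | none   => d.insert flag 1) flag_counts)
      = (fun flag_counts ob =>
        (pvFlagsOf ob).foldl (fun d flag => d.insert flag (d.getD flag 0 + 1)) flag_counts) by
        funext fc ob
        exact congrFun (congrFun (congrArg List.foldl (by funext d flag; exact count_flags_step_eq d flag)) fc) _]
  rw [← List.foldl_flatMap, PySem.Dict.foldl_insert_getD_add_one_eq_counter]

-- ===== VERDICT (by name: the statement is the Claim_ definition above) =====
theorem count_flags_spec : Claim_equal_count_flags := by
  intro obs _ _
  unfold Spec_count_flags count_flags_alt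
  rw [count_flags_eq_counter_items, PySem.Dict.items_counter]
  simp [PySem.List.dedup_eq_ofList, PySem.List.count_eq]
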